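-- pv_equiv track=rewrite | github.com/leo-t-1/CipherProbe | cipherprobe.py | word_cascade_enc
-- ===== SOURCE A (Python) =====
-- import string
--
-- def shift_char(ch, amount):
--     """Shift a letter by `amount`, preserving case. Non-letters pass through."""
--     if ch in string.ascii_lowercase:
--         return chr((ord(ch) - ord('a') + amount) % 26 + ord('a'))
--     if ch in string.ascii_uppercase:
--         return chr((ord(ch) - ord('A') + amount) % 26 + ord('A'))
--     return ch
--
-- def tokenize(text):
--     """Split text into ('word', ...) and ('sep', ...) tokens."""
--     if not text:
--         return []
--     tokens = []
--     current = [text[0]]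
--     in_word = text[0].isalpha()
--     for ch in text[1:]:
--         if ch.isalpha() == in_word:
--             current.append(ch)
--         else:
--             tokens.append(('word' if in_word else 'sep', ''.join(current)))
--             current = [ch]
--             in_word = ch.isalpha()
--     tokens.append(('word' if in_word else 'sep', ''.join(current)))
--     return tokens
--
-- def word_cascade_enc(text):
--     tokens = tokenize(text)
--     cumulative = 0
--     result = []
--     for kind, tok in tokens:
--         if kind == 'word':
--             result.append(''.join(shift_char(c, cumulative) for c in tok))
--             cumulative += len(tok)
--         else:
--             result.append(tok)
--     return ''.join(result)
-- ===== SOURCE B (Python) =====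
-- import string
--
-- def shift_char(ch, amount):
--     """Shift a letter by `amount`, preserving case. Non-letters pass through."""
--     if ch in string.ascii_lowercase:
--         return chr((ord(ch) - ord('a') + amount) % 26 + ord('a'))
--     if ch in string.ascii_uppercase:
--         return chr((ord(ch) - ord('A') + amount) % 26 + ord('A'))
--     return ch
--
-- def word_cascade_enc(text):
--     # Single streaming pass: no tokenize step, no tagged token list.
--     out = []
--     cumulative = 0
--     i = 0
--     n = len(text)
--     while i < n:
--         ch = text[i]
--         if ch.isalpha():
--             j = i + 1
--             while j < n and text[j].isalpha():
--                 j += 1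
--             out.append(''.join(shift_char(c, cumulative) for c in text[i:j]))
--             cumulative += j - i
--             i = j
--         else:
--             out.append(ch)
--             i += 1
--     return ''.join(out)
-- ===== Notes on version B (the rewrite author's own statement) =====
-- stated objective: simpler
-- what changed: B drops A's tokenize pass and tagged ('word'/'sep') token list entirely: one streaming index scan emits non-letters directly and, on a letter, consumes the maximal alphabetic run, shifts it by the current cumulative and advances cumulative by its length.
import Mathlib
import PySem

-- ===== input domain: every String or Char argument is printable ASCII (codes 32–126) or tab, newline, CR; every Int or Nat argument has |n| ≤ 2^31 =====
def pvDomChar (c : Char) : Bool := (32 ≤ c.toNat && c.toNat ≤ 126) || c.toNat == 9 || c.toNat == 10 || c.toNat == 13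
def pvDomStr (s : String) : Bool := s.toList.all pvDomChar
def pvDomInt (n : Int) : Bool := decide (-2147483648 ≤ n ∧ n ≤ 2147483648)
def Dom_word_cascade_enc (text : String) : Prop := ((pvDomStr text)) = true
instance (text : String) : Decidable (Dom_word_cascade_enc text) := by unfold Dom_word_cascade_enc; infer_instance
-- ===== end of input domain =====

-- B replaces A's tokenize-then-encode two-pass design by one streaming scan that consumes
-- maximal alphabetic runs in place (objective: simpler — no tagged token list is ever built).

-- ===== PORT A =====
-- shift_char (defined verbatim in both Source A and Source B, so shared by both ports)
def shiftChar (ch : Char) (amount : Int) : Char :=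
  if ch ∈ "abcdefghijklmnopqrstuvwxyz".toList then
    Char.ofNat ((PySem.Int.mod (((ch.toNat : Int) - (('a'.toNat : Nat) : Int)) + amount) 26 + ('a'.toNat : Int)).toNat)
  else if ch ∈ "ABCDEFGHIJKLMNOPQRSTUVWXYZ".toList then
    Char.ofNat ((PySem.Int.mod (((ch.toNat : Int) - (('A'.toNat : Nat) : Int)) + amount) 26 + ('A'.toNat : Int)).toNat)
  else ch

-- loop body of tokenize's for-loop: state = (tokens, current, in_word)
def tokStep (s : List (String × List Char) × List Char × Bool) (ch : Char) :
    List (String × List Char) × List Char × Bool :=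
  if PySem.Chars.isalpha ch == s.2.2 then (s.1, s.2.1 ++ [ch], s.2.2)
  else (s.1 ++ [((if s.2.2 then "word" else "sep"), s.2.1)], [ch], PySem.Chars.isalpha ch)

-- tokenize; token payloads are kept as List Char (the PySem representation of str)
def tokenize (text : List Char) : List (String × List Char) :=
  match text with
  | [] => []
  | c0 :: rest =>
    let st := rest.foldl tokStep ([], [c0], PySem.Chars.isalpha c0)
    st.1 ++ [((if st.2.2 then "word" else "sep"), st.2.1)]

-- loop body of word_cascade_enc's for-loop: state = (cumulative, result)
def encStep (s : Int × List (List Char)) (kt : String × List Char) : Int × List (List Char) :=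
  if kt.1 == "word" then (s.1 + kt.2.length, s.2 ++ [kt.2.map (fun c => shiftChar c s.1)])
  else (s.1, s.2 ++ [kt.2])

def word_cascade_enc (text : String) : String :=
  let st := (tokenize text.toList).foldl encStep (0, [])
  String.ofList st.2.flatten  -- ''.join(result): flattening char-lists is exactly joining with empty sep

-- ===== PORT B =====
-- streaming scan (Source B's while loop): emit a non-letter directly; on a letter, shift the
-- whole maximal alphabetic run text[i:j] by cumulative, then advance cumulative by its length
def encGo (cs : List Char) (cum : Int) : List Char :=
  match cs with
  | [] => []
  | c :: rest =>
    if h : PySem.Chars.isalpha c = true then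
      let run := (c :: rest).takeWhile PySem.Chars.isalpha
      run.map (fun x => shiftChar x cum) ++
        encGo ((c :: rest).dropWhile PySem.Chars.isalpha) (cum + run.length)
    else
      c :: encGo rest cum
termination_by cs.length
decreasing_by
  · simp only [List.dropWhile_cons, h, if_pos]
    exact Nat.lt_succ_of_le (List.length_dropWhile_le _ _)
  · simp

def word_cascade_enc_alt (text : String) : String :=
  String.ofList (encGo text.toList 0)

-- ===== PRECONDITION & SPEC =====
def Spec_word_cascade_enc (text : String) (out : String) : Prop := out = word_cascade_enc_alt text
instance (text : String) (out : String) : Decidable (Spec_word_cascade_enc text out) := by unfold Spec_word_cascade_enc; infer_instance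

-- ===== CLAIM (what is proved, stated in full; the proofs are below) =====
def Claim_equal_word_cascade_enc : Prop := ∀ (text : String), Dom_word_cascade_enc text → Spec_word_cascade_enc text (word_cascade_enc text)

-- ===== LEMMAS AND PROOFS =====

-- finishing step of tokenize: flush the pending token
def tokFin (st : List (String × List Char) × List Char × Bool) : List (String × List Char) :=
  st.1 ++ [((if st.2.2 then "word" else "sep"), st.2.1)]

-- tokenize's loop state: the emitted-tokens component only accumulates on the left
lemma tokStep_acc (cs : List Char) (t : List (String × List Char)) (cur : List Char) (b : Bool) :
    cs.foldl tokStep (t, cur, b) =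
      (t ++ (cs.foldl tokStep ([], cur, b)).1, (cs.foldl tokStep ([], cur, b)).2) := by
  induction cs generalizing t cur b with
  | nil => simp
  | cons c cs ih =>
    simp only [List.foldl_cons, tokStep]
    by_cases h : PySem.Chars.isalpha c == b
    · simp only [h, if_pos]
      exact ih t (cur ++ [c]) b
    · simp only [h, Bool.false_eq_true, if_false]
      rw [ih (t ++ [((if b then "word" else "sep"), cur)]) [c],
          ih ([] ++ [((if b then "word" else "sep"), cur)]) [c]]
      simp

-- the finished tokenizer loop emits the pending run, then tokenizes the remainder
lemma tok_run (cs : List Char) (cur : List Char) (b : Bool) :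
    tokFin (cs.foldl tokStep ([], cur, b)) =
      ((if b then "word" else "sep"),
        cur ++ cs.takeWhile (fun x => PySem.Chars.isalpha x == b)) ::
      tokenize (cs.dropWhile (fun x => PySem.Chars.isalpha x == b)) := by
  induction cs generalizing cur with
  | nil => simp [tokFin, tokenize]
  | cons c cs ih =>
    simp only [List.foldl_cons, tokStep, List.takeWhile_cons, List.dropWhile_cons]
    by_cases h : PySem.Chars.isalpha c == b
    · simp only [h, if_pos]
      rw [ih (cur ++ [c])]
      simp
    · simp only [h, Bool.false_eq_true, if_false]
      rw [tokStep_acc]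
      simp only [tokFin, tokenize, List.nil_append, List.cons_append]
      simp

-- tokenize peels one maximal same-kind run off the front
lemma tokenize_cons (c : Char) (cs : List Char) :
    tokenize (c :: cs) =
      ((if PySem.Chars.isalpha c then "word" else "sep"),
        c :: cs.takeWhile (fun x => PySem.Chars.isalpha x == PySem.Chars.isalpha c)) ::
      tokenize (cs.dropWhile (fun x => PySem.Chars.isalpha x == PySem.Chars.isalpha c)) := by
  have := tok_run cs [c] (PySem.Chars.isalpha c)
  simpa [tokenize, tokFin] using this

-- A's encoding loop state: the result component only accumulates on the left
lemma encStep_acc (ts : List (String × List Char)) (cum : Int) (res : List (List Char)) :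
    ts.foldl encStep (cum, res) =
      ((ts.foldl encStep (cum, [])).1, res ++ (ts.foldl encStep (cum, [])).2) := by
  induction ts generalizing cum res with
  | nil => simp
  | cons kt ts ih =>
    simp only [List.foldl_cons, encStep]
    by_cases h : kt.1 == "word"
    · simp only [h, if_pos]
      rw [ih _ (res ++ [kt.2.map (fun c => shiftChar c cum)]),
          ih _ ([] ++ [kt.2.map (fun c => shiftChar c cum)])]
      simp
    · simp only [h, Bool.false_eq_true, if_false]
      rw [ih _ (res ++ [kt.2]), ih _ ([] ++ [kt.2])]
      simp

-- B copies a maximal non-alphabetic run through unchanged, one character at a time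
lemma encGo_sep (cs : List Char) (cum : Int) :
    encGo cs cum = cs.takeWhile (fun x => !PySem.Chars.isalpha x) ++
      encGo (cs.dropWhile (fun x => !PySem.Chars.isalpha x)) cum := by
  induction cs with
  | nil => simp
  | cons c cs ih =>
    by_cases h : PySem.Chars.isalpha c = true
    · simp [h]
    · rw [encGo]
      simp only [h, List.takeWhile_cons, List.dropWhile_cons, Bool.not_eq_true']
      simp only [Bool.not_eq_true] at h
      simp [ih]

-- core equivalence: A's fold over the token list equals B's streaming scan
lemma enc_main (n : Nat) : ∀ (cs : List Char), cs.length ≤ n → ∀ (cum : Int),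
    ((tokenize cs).foldl encStep (cum, [])).2.flatten = encGo cs cum := by
  induction n with
  | zero =>
    intro cs hcs cum
    have : cs = [] := List.eq_nil_of_length_eq_zero (Nat.le_zero.mp hcs)
    subst this
    simp [tokenize, encGo]
  | succ n ih =>
    intro cs hcs cum
    match cs with
    | [] => simp [tokenize, encGo]
    | c :: cs =>
      rw [tokenize_cons]
      by_cases h : PySem.Chars.isalpha c = true
      · have hp : (fun x => PySem.Chars.isalpha x == PySem.Chars.isalpha c)
            = (fun x => PySem.Chars.isalpha x) := by
          funext x; simp [h]
        rw [hp]
        simp only [h, if_pos, List.foldl_cons, encStep, beq_self_eq_true]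
        rw [encStep_acc]
        simp only [List.flatten_append]
        rw [ih _ (le_trans (List.length_dropWhile_le _ _) (Nat.le_of_succ_le_succ hcs))]
        rw [encGo]
        simp only [h, dif_pos, List.takeWhile_cons, List.dropWhile_cons, if_pos]
        simp
      · have hp : (fun x => PySem.Chars.isalpha x == PySem.Chars.isalpha c)
            = (fun x => !PySem.Chars.isalpha x) := by
          funext x
          simp only [Bool.not_eq_true] at h
          simp [h]
        rw [hp]
        simp only [h, List.foldl_cons, encStep]
        norm_num
        rw [encStep_acc]
        simp only [List.flatten_append]
        rw [ih _ (le_trans (List.length_dropWhile_le _ _) (Nat.le_of_succ_le_succ hcs))]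
        rw [encGo]
        simp only [h]
        rw [encGo_sep cs cum]
        simp

-- ===== VERDICT (by name: the statement is the Claim_ definition above) =====
theorem word_cascade_enc_spec : Claim_equal_word_cascade_enc := by
  intro text _
  show _ = _
  unfold word_cascade_enc word_cascade_enc_alt
  exact congrArg String.ofList (enc_main text.toList.length text.toList le_rfl 0)
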